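-- pv_equiv track=rewrite | github.com/CAdarsh/601.447-647_HW3 | hw3q2.py | addInd
-- ===== SOURCE A (Python) =====
-- def addInd(arr):
--     name = {}
--     a = []
--     for i in arr:
--         if i in name:
--             name[i] += 1
--             a.append(str(i) + str(name[i]))
--         else:
--             name[i] = 0
--             a.append(str(i) + str(name[i]))
--     return a
-- ===== SOURCE B (Python) =====
-- def addInd(arr):
--     # Group-and-reassemble: for each distinct value collect its positions, label
--     # the k-th occurrence with k, then rebuild the output by sorting on position.
--     labeled = []
--     for v in set(arr):
--         positions = [j for j, x in enumerate(arr) if x == v]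
--         for k, j in enumerate(positions):
--             labeled.append((j, v + str(k)))
--     labeled.sort(key=lambda t: t[0])
--     return [lab for _, lab in labeled]
-- ===== Notes on version B (the rewrite author's own statement) =====
-- stated objective: alternative
-- what changed: Replaced the single streaming pass with a running dict counter by a group-and-reassemble algorithm: for each distinct value gather its list of positions, label the k-th occurrence with k, then sort the (position, label) pairs by position to rebuild the output.
import Mathlib
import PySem

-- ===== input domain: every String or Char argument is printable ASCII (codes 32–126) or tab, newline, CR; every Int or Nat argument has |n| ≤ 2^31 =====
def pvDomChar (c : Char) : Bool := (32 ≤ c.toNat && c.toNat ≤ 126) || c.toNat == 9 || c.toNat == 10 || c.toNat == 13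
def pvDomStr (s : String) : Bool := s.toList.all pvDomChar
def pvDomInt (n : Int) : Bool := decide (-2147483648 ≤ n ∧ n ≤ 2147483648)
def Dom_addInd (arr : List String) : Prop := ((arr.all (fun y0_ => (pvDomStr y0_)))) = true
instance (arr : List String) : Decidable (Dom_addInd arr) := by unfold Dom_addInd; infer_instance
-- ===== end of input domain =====

-- B replaces A's streaming dict-counter pass by group-and-reassemble: per distinct
-- value gather positions, rank them, then sort (position, label) pairs back (alternative, not faster).


-- ===== PORT A =====
-- literal port of A: a dict 'name' of running counts and an output list 'a', built by one foldl
def addInd (arr : List String) : List String :=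
  (arr.foldl (fun (st : PySem.Dict String Int × List String) i =>
      match st.1.get? i with
      | some v => (st.1.insert i (v + 1), st.2 ++ [i ++ PySem.Int.toStr (v + 1)])
      | none   => (st.1.insert i 0, st.2 ++ [i ++ PySem.Int.toStr 0]))
    (PySem.Dict.empty, [])).2

-- ===== PORT B =====
-- literal port of B: over the distinct values, collect each value's positions, rank them,
-- append (position, value+str(rank)) pairs, then sort by position and project the labels
def addInd_alt (arr : List String) : List String :=
  let labeled := (PySem.Set.ofList arr).foldl (fun acc v =>
      let positions := ((PySem.List.enumerate arr).filter (fun p => p.2 == v)).map Prod.fst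
      (PySem.List.enumerate positions).foldl
        (fun acc2 q => acc2 ++ [(q.2, v ++ PySem.Int.toStr q.1)]) acc) []
  (PySem.List.sorted labeled Prod.fst false).map Prod.snd

-- ===== PRECONDITION & SPEC =====
def Spec_addInd (arr : List String) (out : List String) : Prop := out = addInd_alt arr
instance (arr : List String) (out : List String) : Decidable (Spec_addInd arr out) := by unfold Spec_addInd; infer_instance

-- ===== CLAIM (what is proved, stated in full; the proofs are below) =====
def Claim_equal_addInd : Prop := ∀ (arr : List String), Dom_addInd arr → Spec_addInd arr (addInd arr)

-- ===== LEMMAS AND PROOFS =====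

-- the (position, value, prior-count) triples of 'rest' after prefix 'pre' has been consumed
def tagged : List String → List String → List (Int × String × Int)
  | _,   []      => []
  | pre, i :: rs => (((pre.length : Nat) : Int), i, ((pre.count i : Nat) : Int)) :: tagged (pre ++ [i]) rs

def lab3 (t : Int × String × Int) : String := t.2.1 ++ PySem.Int.toStr t.2.2
def pair3 (t : Int × String × Int) : Int × String := (t.1, lab3 t)

-- A's loop, started with a dict recording the running counts of 'pre', produces the labels of 'tagged pre rest'
theorem addInd_loop_eq (rest : List String) : ∀ (pre : List String)
    (d : PySem.Dict String Int) (a : List String),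
    (∀ s, d.get? s = if pre.count s = 0 then none else some ((pre.count s : Int) - 1)) →
    (rest.foldl (fun (st : PySem.Dict String Int × List String) i =>
        match st.1.get? i with
        | some v => (st.1.insert i (v + 1), st.2 ++ [i ++ PySem.Int.toStr (v + 1)])
        | none   => (st.1.insert i 0, st.2 ++ [i ++ PySem.Int.toStr 0]))
      (d, a)).2 = a ++ (tagged pre rest).map lab3 := by
  induction rest with
  | nil => intro pre d a _; simp [tagged]
  | cons i rs ih =>
    intro pre d a hinv
    simp only [List.foldl_cons, tagged, List.map_cons]
    by_cases hc : pre.count i = 0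
    · rw [hinv i]
      simp only [hc, reduceIte]
      rw [ih (pre ++ [i]) _ _ ?_]
      · simp [lab3]
      · intro s
        by_cases hs : s = i
        · subst hs
          have h1 : (pre ++ [s]).count s = pre.count s + 1 := by simp [List.count_append]
          simp [PySem.Dict.get?_insert_self, h1, hc]
        · rw [PySem.Dict.get?_insert_of_ne _ _ hs, hinv s]
          have h0 : List.count s [i] = 0 := by rw [List.count_eq_zero]; simp [hs]
          simp [List.count_append, h0]
    · rw [hinv i]
      simp only [hc, reduceIte]
      rw [ih (pre ++ [i]) _ _ ?_]
      · have h2 : (pre.count i : Int) - 1 + 1 = (pre.count i : Int) := by ring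
        simp [lab3, h2]
      · intro s
        by_cases hs : s = i
        · subst hs
          have h1 : (pre ++ [s]).count s = pre.count s + 1 := by simp [List.count_append]
          rw [PySem.Dict.get?_insert_self, h1]
          have h3 : pre.count s + 1 ≠ 0 := by omega
          simp only [h3, reduceIte]
          congr 1
          push_cast
          ring
        · rw [PySem.Dict.get?_insert_of_ne _ _ hs, hinv s]
          have h0 : List.count s [i] = 0 := by rw [List.count_eq_zero]; simp [hs]
          simp [List.count_append, h0]

-- the values occurring in tagged pre rest are the elements of rest
theorem tagged_key_mem (rest : List String) : ∀ pre t, t ∈ tagged pre rest → t.2.1 ∈ rest := by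
  induction rest with
  | nil => intro pre t h; simp [tagged] at h
  | cons i rs ih =>
    intro pre t h
    simp only [tagged, List.mem_cons] at h
    rcases h with h | h
    · subst h; simp
    · exact List.mem_cons_of_mem _ (ih _ _ h)

-- positions in tagged pre rest are at least pre.length
theorem tagged_fst_ge (rest : List String) : ∀ pre t, t ∈ tagged pre rest → ((pre.length : Nat) : Int) ≤ t.1 := by
  induction rest with
  | nil => intro pre t h; simp [tagged] at h
  | cons i rs ih =>
    intro pre t h
    simp only [tagged, List.mem_cons] at h
    rcases h with h | h
    · subst h; simp
    · have := ih (pre ++ [i]) t h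
      simp only [List.length_append, List.length_cons, List.length_nil] at this
      push_cast at this ⊢
      omega

-- positions in tagged are strictly increasing
theorem tagged_pairwise (rest : List String) : ∀ pre, (tagged pre rest).Pairwise (fun a b => a.1 < b.1) := by
  induction rest with
  | nil => intro pre; simp [tagged]
  | cons i rs ih =>
    intro pre
    simp only [tagged]
    refine List.Pairwise.cons ?_ (ih (pre ++ [i]))
    intro t ht
    have := tagged_fst_ge rs (pre ++ [i]) t ht
    simp only [List.length_append, List.length_cons, List.length_nil] at this
    push_cast at this ⊢
    omega

-- partitioning a list by a nodup list of values covering its keys is a permutation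
theorem partition_perm (vs : List String) (hnd : vs.Nodup) :
    ∀ (L : List (Int × String × Int)), (∀ t ∈ L, t.2.1 ∈ vs) →
    (vs.flatMap (fun v => L.filter (fun t => t.2.1 == v))).Perm L := by
  induction vs with
  | nil =>
    intro L hL
    cases L with
    | nil => simp
    | cons t ts => exact absurd (hL t (by simp)) (by simp)
  | cons v vs' ih =>
    intro L hL
    have hnd' : vs'.Nodup := hnd.of_cons
    have hvn : v ∉ vs' := by simp [List.nodup_cons] at hnd; exact hnd.1
    simp only [List.flatMap_cons]
    have hcongr : vs'.flatMap (fun v' => L.filter (fun t => t.2.1 == v')) =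
        vs'.flatMap (fun v' => (L.filter (fun t => ¬ (t.2.1 = v))).filter (fun t => t.2.1 == v')) := by
      apply List.flatMap_congr
      intro v' hv'
      rw [List.filter_filter]
      apply List.filter_congr
      intro t _
      have hvv : v' ≠ v := fun h => hvn (h ▸ hv')
      by_cases h : t.2.1 = v' <;> simp [h, hvv]
    have hLsub : ∀ t ∈ L.filter (fun t => ¬ (t.2.1 = v)), t.2.1 ∈ vs' := by
      intro t ht
      have ht' := List.mem_of_mem_filter ht
      have hne : ¬ (t.2.1 = v) := by simpa using List.of_mem_filter ht
      have := hL t ht'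
      simp only [List.mem_cons] at this
      tauto
    have hrec := ih hnd' _ hLsub
    rw [hcongr]
    refine List.Perm.trans (hrec.append_left _) ?_
    have heq : L.filter (fun t => ¬ (t.2.1 = v)) = L.filter (fun t => !(t.2.1 == v)) := by
      apply List.filter_congr
      intro t _
      by_cases h : t.2.1 = v <;> simp [h]
    rw [heq]
    exact List.filter_append_perm _ L

-- the per-value group of B equals the filtered tagged list, mapped to (position, label)
theorem group_eq (rest : List String) : ∀ (pre : List String) (v : String),
    (PySem.List.enumerate (((PySem.List.enumerate rest ((pre.length : Nat) : Int)).filter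
        (fun p => p.2 == v)).map Prod.fst) ((pre.count v : Nat) : Int)).map
      (fun q => (q.2, v ++ PySem.Int.toStr q.1))
    = ((tagged pre rest).filter (fun t => t.2.1 == v)).map pair3 := by
  induction rest with
  | nil => intro pre v; simp [tagged, PySem.List.enumerate_nil]
  | cons i rs ih =>
    intro pre v
    rw [PySem.List.enumerate_cons]
    simp only [tagged]
    by_cases hiv : i = v
    · subst hiv
      rw [List.filter_cons_of_pos (by simp), List.filter_cons_of_pos (by simp)]
      rw [List.map_cons, PySem.List.enumerate_cons, List.map_cons]
      have h1 : (((pre ++ [i]).length : Nat) : Int) = ((pre.length : Nat) : Int) + 1 := by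
        simp
      have h2 : (((pre ++ [i]).count i : Nat) : Int) = ((pre.count i : Nat) : Int) + 1 := by
        have hh : (pre ++ [i]).count i = pre.count i + 1 := by simp [List.count_append]
        rw [hh]; push_cast; ring
      have hrec := ih (pre ++ [i]) i
      rw [h1, h2] at hrec
      rw [hrec]
      simp [pair3, lab3]
    · rw [List.filter_cons_of_neg (by simp [hiv]), List.filter_cons_of_neg (by simp [hiv])]
      have h1 : (((pre ++ [i]).length : Nat) : Int) = ((pre.length : Nat) : Int) + 1 := by
        simp
      have h2 : (((pre ++ [i]).count v : Nat) : Int) = ((pre.count v : Nat) : Int) := by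
        have hh : (pre ++ [i]).count v = pre.count v := by
          simp [List.count_append, hiv]
        rw [hh]
      have hrec := ih (pre ++ [i]) v
      rw [h1, h2] at hrec
      exact hrec

-- ===== VERDICT (by name: the statement is the Claim_ definition above) =====
theorem addInd_spec : Claim_equal_addInd := by
  intro arr _
  show addInd arr = addInd_alt arr
  unfold addInd addInd_alt
  rw [addInd_loop_eq arr [] PySem.Dict.empty [] (by intro s; simp)]
  simp only [List.nil_append]
  -- rewrite B's inner append loop into a map of the filtered tagged list
  have hinner : ∀ (v : String) (acc : List (Int × String)),
      (PySem.List.enumerate (((PySem.List.enumerate arr).filter (fun p => p.2 == v)).map Prod.fst)).foldl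
        (fun acc2 q => acc2 ++ [(q.2, v ++ PySem.Int.toStr q.1)]) acc
      = acc ++ ((tagged [] arr).filter (fun t => t.2.1 == v)).map pair3 := by
    intro v acc
    rw [PySem.List.foldl_append_singleton_eq_map]
    have hg := group_eq arr [] v
    simp only [List.length_nil, Nat.cast_zero, List.count_nil] at hg
    rw [hg]
  -- and B's outer loop into a flatMap over the distinct values
  have houter := PySem.List.foldl_congr_mem
    (l := PySem.Set.ofList arr) (init := ([] : List (Int × String)))
    (f := fun acc v =>
      (PySem.List.enumerate (((PySem.List.enumerate arr).filter (fun p => p.2 == v)).map Prod.fst)).foldl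
        (fun acc2 q => acc2 ++ [(q.2, v ++ PySem.Int.toStr q.1)]) acc)
    (g := fun acc v => acc ++ ((tagged [] arr).filter (fun t => t.2.1 == v)).map pair3)
    (by intro acc v _; exact hinner v acc)
  rw [houter, PySem.List.foldl_append_eq_flatMap, List.nil_append]
  -- the flatMap is a permutation of the tagged list; sorting by position recovers it
  have hperm : ((PySem.Set.ofList arr).flatMap
      (fun v => ((tagged [] arr).filter (fun t => t.2.1 == v)).map pair3)).Perm
      ((tagged [] arr).map pair3) := by
    rw [show (PySem.Set.ofList arr).flatMap
        (fun v => ((tagged [] arr).filter (fun t => t.2.1 == v)).map pair3)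
        = ((PySem.Set.ofList arr).flatMap
            (fun v => (tagged [] arr).filter (fun t => t.2.1 == v))).map pair3 from (List.map_flatMap).symm]
    apply List.Perm.map
    apply partition_perm _ (PySem.Set.nodup_ofList arr)
    intro t ht
    rw [PySem.Set.mem_ofList]
    exact tagged_key_mem arr [] t ht
  have hpair : ((tagged [] arr).map pair3).Pairwise (fun a b => a.1 < b.1) :=
    List.Pairwise.map pair3 (fun a b h => h) (tagged_pairwise arr [])
  rw [PySem.List.sorted_eq_of_perm_of_pairwise_lt _ ((tagged [] arr).map pair3) Prod.fst
    hperm.symm hpair]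
  rw [List.map_map]
  rfl
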